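-- pv_equiv track=rewrite | github.com/leetcoders-unite/yongkhengs | getSmallestLexiString.py | stored_word
-- ===== SOURCE A (Python) =====
-- def stored_word(word, max_operations):
--     n = len(word)
--
--     for ch in 'abcdefghijklmnopqrstuvwxyz':
--         if max_operations == 0:
--             break
--
--         count = word.count(ch)
--         if count > 0:
--             # Determine the replacement character
--             if ch == 'a':
--                 replacement = 'z'
--             else:
--                 replacement = chr(ord(ch) - 1)
--
--             # Check if the replacement makes the word lexicographically smaller
--             new_word = word.replace(ch, replacement)
--             if new_word < word:
--                 word = new_word
--                 max_operations -= 1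
--
--     return word
-- ===== SOURCE B (Python) =====
-- def stored_word(word, max_operations):
--     # Pick the letters to decrement: letters 'b'..'z' that occur in word,
--     # in ascending order, while the operation budget is nonzero; then
--     # rewrite the word in a single pass. ('a' is never decremented: a->z
--     # only makes the word larger.)
--     present = set(word)
--     targets = set()
--     budget = max_operations
--     for ch in 'bcdefghijklmnopqrstuvwxyz':
--         if budget == 0:
--             break
--         if ch in present:
--             targets.add(ch)
--             budget -= 1
--     return ''.join(chr(ord(c) - 1) if c in targets else c for c in word)
-- ===== Notes on version B (the rewrite author's own statement) =====
-- stated objective: alternative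
-- what changed: Replaces A's 26 count/replace/lexicographic-compare passes over the word by first picking the target letters ('b'..'z' present in the word, ascending, while the budget lasts) from a precomputed character set and then rewriting the word in a single pass.
import Mathlib
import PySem

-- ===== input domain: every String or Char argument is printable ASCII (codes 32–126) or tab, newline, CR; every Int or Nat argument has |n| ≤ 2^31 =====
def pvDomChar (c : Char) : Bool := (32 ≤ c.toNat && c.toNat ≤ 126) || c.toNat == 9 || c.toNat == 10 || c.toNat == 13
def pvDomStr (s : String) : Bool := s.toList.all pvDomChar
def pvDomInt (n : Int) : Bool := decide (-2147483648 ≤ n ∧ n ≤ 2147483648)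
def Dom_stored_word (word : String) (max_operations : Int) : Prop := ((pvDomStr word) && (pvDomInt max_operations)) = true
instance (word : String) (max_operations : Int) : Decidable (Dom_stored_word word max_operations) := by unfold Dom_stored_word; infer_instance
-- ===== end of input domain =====

-- B picks the target letters ('b'..'z' present in the word, ascending, while the budget lasts)
-- from a precomputed character set and rewrites the word in one pass, instead of A's 26
-- count/replace/compare passes; alternative decomposition, equivalence proved on all inputs.


-- ===== PORT A =====
-- the for-loop over 'abcdefghijklmnopqrstuvwxyz' with its `break` as structural recursion,
-- state = (word, max_operations)
def storedWordLoopA : List Char → String → Int → String × Int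
  | [], w, m => (w, m)
  | ch :: rest, w, m =>
    if m == 0 then (w, m)     -- break: the remaining iterations do nothing
    else
      let count := PySem.Str.count w (String.singleton ch)
      if count > 0 then
        let replacement := if ch == 'a' then 'z' else Char.ofNat (ch.toNat - 1)
        let new_word := PySem.Str.replace w (String.singleton ch) (String.singleton replacement)
        if new_word < w then storedWordLoopA rest new_word (m - 1)
        else storedWordLoopA rest w m
      else storedWordLoopA rest w m

def stored_word (word : String) (max_operations : Int) : String :=
  let _n := PySem.Str.len word   -- A computes n = len(word) and never uses it
  (storedWordLoopA "abcdefghijklmnopqrstuvwxyz".toList word max_operations).1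

-- ===== PORT B =====
-- B's for-loop over 'bcdefghijklmnopqrstuvwxyz' with its `break`, collecting the target set
def pickTargets : List Char → PySem.Set Char → Int → PySem.Set Char → PySem.Set Char
  | [], targets, _, _ => targets
  | ch :: rest, targets, budget, present =>
    if budget == 0 then targets     -- break
    else if PySem.Set.contains present ch then
      pickTargets rest (PySem.Set.add targets ch) (budget - 1) present
    else pickTargets rest targets budget present

def stored_word_alt (word : String) (max_operations : Int) : String :=
  let present := PySem.Set.ofList word.toList
  let targets := pickTargets "bcdefghijklmnopqrstuvwxyz".toList PySem.Set.empty max_operations present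
  -- ''.join(chr(ord(c) - 1) if c in targets else c for c in word)
  PySem.Str.join "" (word.toList.map (fun c =>
    if PySem.Set.contains targets c then String.singleton (Char.ofNat (c.toNat - 1))
    else String.singleton c))

-- ===== PRECONDITION & SPEC =====
def Spec_stored_word (word : String) (max_operations : Int) (out : String) : Prop := out = stored_word_alt word max_operations
instance (word : String) (max_operations : Int) (out : String) : Decidable (Spec_stored_word word max_operations out) := by unfold Spec_stored_word; infer_instance

-- ===== CLAIM (what is proved, stated in full; the proofs are below) =====
def Claim_equal_stored_word : Prop := ∀ (word : String) (max_operations : Int), Dom_stored_word word max_operations → Spec_stored_word word max_operations (stored_word word max_operations)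

-- ===== LEMMAS AND PROOFS =====

-- `applyT T` is the substitution that B's final pass performs
def applyT (T : List Char) (c : Char) : Char :=
  if T.contains c then Char.ofNat (c.toNat - 1) else c

theorem toNat_ofNat_letter {n : Nat} (h1 : 96 ≤ n) (h2 : n ≤ 122) :
    (Char.ofNat n).toNat = n := by
  rw [Char.toNat_ofNat]
  have : n.isValidChar := Or.inl (by omega)
  simp [this]

-- Chars.count on a single-character needle is List.count
theorem count_go_singleton (c : Char) :
    ∀ (fuel : Nat) (l : List Char) (acc : Nat), l.length ≤ fuel →
      PySem.Chars.count.go [c] fuel l acc = acc + l.count c := by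
  intro fuel
  induction fuel with
  | zero => intro l acc h; interval_cases hl : l.length; simp_all [List.length_eq_zero_iff.mp hl, PySem.Chars.count.go]
  | succ fuel ih =>
    intro l acc h
    cases l with
    | nil => simp [PySem.Chars.count.go]
    | cons x t =>
      simp only [PySem.Chars.count.go, List.isPrefixOf, List.count_cons]
      by_cases hx : c = x
      · subst hx
        simp only [beq_self_eq_true, Bool.true_and, if_true,
          List.length_cons, List.length_nil, List.drop_succ_cons, List.drop_zero] at *
        rw [ih t (acc + 1) (by omega)]
        omega
      · have hb : (c == x) = false := by simp [hx]
        simp only [hb, Bool.false_and, if_neg Bool.false_ne_true]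
        simp only [List.length_cons] at h
        rw [ih t acc (by omega)]
        have : (x == c) = false := by simp [Ne.symm hx]
        simp [this]

theorem count_singleton (s : List Char) (c : Char) :
    PySem.Chars.count s [c] = s.count c := by
  simp [PySem.Chars.count]
  simpa using count_go_singleton c s.length s 0 le_rfl

-- Chars.replace with single-character old/new is a map
theorem replace_go_singleton (c d : Char) :
    ∀ (fuel : Nat) (l : List Char) (acc : List Char), l.length ≤ fuel →
      PySem.Chars.replace.go [c] [d] fuel l acc
        = acc.reverse ++ l.map (fun x => if x == c then d else x) := by
  intro fuel
  induction fuel with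
  | zero => intro l acc h; interval_cases hl : l.length; simp_all [List.length_eq_zero_iff.mp hl, PySem.Chars.replace.go]
  | succ fuel ih =>
    intro l acc h
    cases l with
    | nil => simp [PySem.Chars.replace.go]
    | cons x t =>
      simp only [PySem.Chars.replace.go, List.isPrefixOf, List.map_cons]
      by_cases hx : c = x
      · subst hx
        simp only [beq_self_eq_true, Bool.true_and, if_true,
          List.length_cons, List.length_nil, List.drop_succ_cons, List.drop_zero] at *
        rw [ih t ([d].reverse ++ acc) (by omega)]
        simp
      · have hb : (c == x) = false := by simp [hx]
        simp only [hb, Bool.false_and, if_neg Bool.false_ne_true]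
        simp only [List.length_cons] at h
        rw [ih t (x :: acc) (by omega)]
        have : (x == c) = false := by simp [Ne.symm hx]
        simp [this]

theorem replace_singleton (s : List Char) (c d : Char) :
    PySem.Chars.replace s [c] [d] = s.map (fun x => if x == c then d else x) := by
  simp [PySem.Chars.replace]
  simpa using replace_go_singleton c d s.length s [] le_rfl

-- lexicographic facts
theorem lex_map_of_pointwise {f g : Char → Char} :
    ∀ (l : List Char), (∀ x ∈ l, g x = f x ∨ g x < f x) → (∃ x ∈ l, g x ≠ f x) →
      List.Lex (· < ·) (l.map g) (l.map f)
  | [], _, hex => absurd hex (by simp)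
  | x :: t, hle, hex => by
    by_cases hx : g x = f x
    · rcases hex with ⟨y, hy, hne⟩
      rcases List.mem_cons.mp hy with rfl | hy'
      · exact absurd hx hne
      · simp only [List.map_cons, hx]
        exact List.Lex.cons (lex_map_of_pointwise t
          (fun z hz => hle z (List.mem_cons_of_mem _ hz)) ⟨y, hy', hne⟩)
    · rcases hle x (by simp) with h | h
      · exact absurd h hx
      · exact List.Lex.rel h

theorem not_lex_map {g : Char → Char} :
    ∀ (l : List Char), (∀ x ∈ l, ¬ g x < x) → ¬ List.Lex (· < ·) (l.map g) l
  | [], _, hlex => by cases hlex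
  | x :: t, h, hlex => by
    rcases List.cons_lex_cons_iff.mp hlex with hr | ⟨heq, htail⟩
    · exact h x (by simp) hr
    · exact not_lex_map t (fun y hy => h y (by simp [hy])) htail

-- membership form of applyT
theorem applyT_eq (T : List Char) (x : Char) :
    applyT T x = if x ∈ T then Char.ofNat (x.toNat - 1) else x := by
  simp [applyT]

theorem char_lt_of_toNat_lt {c d : Char} (h : c.toNat < d.toNat) : c < d :=
  Char.lt_def.mpr h

theorem char_ne_of_toNat_ne {c d : Char} (h : c.toNat ≠ d.toNat) : c ≠ d :=
  fun he => h (he ▸ rfl)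

theorem applyT_eq_iff {T : List Char} {ch : Char}
    (hT : ∀ t ∈ T, 98 ≤ t.toNat ∧ t.toNat ≤ 122)
    (hltch : ∀ t ∈ T, t < ch) (x : Char) :
    applyT T x = ch ↔ x = ch := by
  rw [applyT_eq]
  by_cases hx : x ∈ T
  · have h1 := hT x hx
    have h2 : x.toNat < ch.toNat := Char.lt_def.mp (hltch x hx)
    rw [if_pos hx]
    apply iff_of_false
    · apply char_ne_of_toNat_ne
      rw [toNat_ofNat_letter (by omega) (by omega)]
      omega
    · exact fun he => absurd (he ▸ hltch x hx) (lt_irrefl ch)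
  · rw [if_neg hx]

theorem count_map_eq {f : Char → Char} {ch : Char} (hf : ∀ x, f x = ch ↔ x = ch) :
    ∀ w : List Char, (w.map f).count ch = w.count ch
  | [] => rfl
  | x :: t => by
    have hb : (f x == ch) = (x == ch) := by
      by_cases hx : x = ch
      · subst hx
        have hfx := (hf x).mpr rfl
        simp [hfx]
      · have hne : f x ≠ ch := fun h => hx ((hf x).mp h)
        simp [hx, hne]
    simp [List.count_cons, hb, count_map_eq hf t]

-- composing the one-letter substitution with the pending substitutions
theorem subst_applyT_eq {T : List Char} {ch : Char}
    (hT : ∀ t ∈ T, 98 ≤ t.toNat ∧ t.toNat ≤ 122)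
    (hltch : ∀ t ∈ T, t < ch)
    (hch : 98 ≤ ch.toNat ∧ ch.toNat ≤ 122) (x : Char) :
    (if applyT T x == ch then Char.ofNat (ch.toNat - 1) else applyT T x)
      = applyT (T ++ [ch]) x := by
  have hiff := applyT_eq_iff hT hltch x
  by_cases hxc : x = ch
  · subst hxc
    rw [(hiff.mpr rfl)]
    simp [applyT_eq]
  · have hne : applyT T x ≠ ch := fun h => hxc (hiff.mp h)
    rw [if_neg (by simpa using hne)]
    rw [applyT_eq, applyT_eq]
    have hmem : x ∈ T ++ [ch] ↔ x ∈ T := by simp [hxc]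
    by_cases hx : x ∈ T
    · rw [if_pos hx, if_pos (hmem.mpr hx)]
    · rw [if_neg hx, if_neg (fun h => hx (hmem.mp h))]

-- the main loop invariant: with the current word having the pending substitutions applied,
-- A's remaining loop produces exactly what B's target set prescribes
theorem loop_invariant (ls : List Char) :
    ∀ (w T : List Char) (m : Int),
      (∀ c ∈ ls, 98 ≤ c.toNat ∧ c.toNat ≤ 122) →
      List.Pairwise (· < ·) ls →
      (∀ t ∈ T, 98 ≤ t.toNat ∧ t.toNat ≤ 122) →
      (∀ t ∈ T, ∀ c ∈ ls, t < c) →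
      (storedWordLoopA ls (String.ofList (w.map (applyT T))) m).1
        = String.ofList (w.map (applyT (pickTargets ls T m (PySem.Set.ofList w)))) := by
  induction ls with
  | nil => intro w T m _ _ _ _; simp [storedWordLoopA, pickTargets]
  | cons ch rest ih =>
    intro w T m hrange hpair hT hlt
    have hch := hrange ch (List.mem_cons_self)
    have hltch : ∀ t ∈ T, t < ch := fun t ht => hlt t ht ch (List.mem_cons_self)
    have hiff := applyT_eq_iff hT hltch
    by_cases hm : m = 0
    · subst hm
      simp [storedWordLoopA, pickTargets]
    · have hmb : ¬ ((m == 0) = true) := by simp [hm]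
      have hcount : PySem.Str.count (String.ofList (w.map (applyT T))) (String.singleton ch)
          = w.count ch := by
        rw [PySem.Str.count_eq]
        simp only [String.toList_ofList, String.toList_singleton]
        rw [count_singleton]
        exact count_map_eq hiff w
      have hrange' : ∀ c ∈ rest, 98 ≤ c.toNat ∧ c.toNat ≤ 122 :=
        fun c hc => hrange c (List.mem_cons_of_mem _ hc)
      have hpair' := (List.pairwise_cons.mp hpair).2
      by_cases hmem : ch ∈ w
      · -- the letter occurs: A replaces it and spends one operation, B adds it to the targets
        have hcha : ¬ ((ch == 'a') = true) := by
          simp only [beq_iff_eq]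
          apply char_ne_of_toNat_ne
          have : ('a').toNat = 97 := rfl
          omega
        have hnot : ch ∉ T := fun h => absurd (hltch ch h) (lt_irrefl ch)
        have hnw : PySem.Str.replace (String.ofList (w.map (applyT T)))
              (String.singleton ch) (String.singleton (Char.ofNat (ch.toNat - 1)))
            = String.ofList (w.map (applyT (T ++ [ch]))) := by
          apply String.toList_inj.mp
          rw [PySem.Str.toList_replace]
          simp only [String.toList_ofList, String.toList_singleton]
          rw [replace_singleton, List.map_map]
          exact List.map_congr_left (fun x _ => subst_applyT_eq hT hltch hch x)
        have hless : String.ofList (w.map (applyT (T ++ [ch])))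
            < String.ofList (w.map (applyT T)) := by
          rw [String.lt_iff_toList_lt]
          simp only [String.toList_ofList]
          refine (List.lt_iff_lex_lt _ _).mpr (lex_map_of_pointwise w ?_ ?_)
          · intro x hx
            by_cases hxc : x = ch
            · subst hxc
              right
              rw [applyT_eq, applyT_eq, if_pos (by simp), if_neg hnot]
              exact char_lt_of_toNat_lt (by rw [toNat_ofNat_letter (by omega) (by omega)]; omega)
            · left
              rw [← subst_applyT_eq hT hltch hch x]
              have hne : applyT T x ≠ ch := fun h => hxc ((hiff x).mp h)
              rw [if_neg (by simpa using hne)]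
          · refine ⟨ch, hmem, ?_⟩
            rw [applyT_eq, applyT_eq, if_pos (by simp), if_neg hnot]
            apply char_ne_of_toNat_ne
            rw [toNat_ofNat_letter (by omega) (by omega)]
            omega
        have hT' : ∀ t ∈ T ++ [ch], 98 ≤ t.toNat ∧ t.toNat ≤ 122 := by
          intro t ht
          rcases List.mem_append.mp ht with h | h
          · exact hT t h
          · simp at h; subst h; exact hch
        have hlt' : ∀ t ∈ T ++ [ch], ∀ c ∈ rest, t < c := by
          intro t ht c hc
          rcases List.mem_append.mp ht with h | h
          · exact hlt t h c (List.mem_cons_of_mem _ hc)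
          · simp at h; subst h; exact (List.pairwise_cons.mp hpair).1 c hc
        have hadd : PySem.Set.add T ch = T ++ [ch] := by
          simp [PySem.Set.add, hnot]
        have hpresent : PySem.Set.contains (PySem.Set.ofList w) ch = true :=
          (PySem.Set.contains_iff _ _).mpr ((PySem.Set.mem_ofList _ _).mpr hmem)
        simp only [storedWordLoopA, pickTargets]
        rw [if_neg hmb, if_neg hmb, hcount, if_pos (List.count_pos_iff.mpr hmem),
          if_neg hcha, hnw, if_pos hless, if_pos hpresent, hadd]
        exact ih w (T ++ [ch]) (m - 1) hrange' hpair' hT' hlt'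
      · -- the letter does not occur: both sides skip it
        have hc0 : w.count ch = 0 := List.count_eq_zero.mpr hmem
        have hpresent : ¬ (PySem.Set.contains (PySem.Set.ofList w) ch = true) :=
          fun h => hmem ((PySem.Set.mem_ofList _ _).mp ((PySem.Set.contains_iff _ _).mp h))
        simp only [storedWordLoopA, pickTargets]
        rw [if_neg hmb, if_neg hmb, hcount, hc0, if_neg (by omega), if_neg hpresent]
        exact ih w T m hrange' hpair' hT (fun t ht c hc => hlt t ht c (List.mem_cons_of_mem _ hc))

-- B's output as one substitution pass
theorem alt_eq_map (word : String) (m : Int) :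
    stored_word_alt word m
      = String.ofList (word.toList.map (applyT
          (pickTargets "bcdefghijklmnopqrstuvwxyz".toList PySem.Set.empty m
            (PySem.Set.ofList word.toList)))) := by
  unfold stored_word_alt
  apply String.toList_inj.mp
  rw [PySem.Str.toList_join]
  simp only [String.toList_ofList, List.map_map]
  have h1 : (String.toList ∘ fun c =>
      if (pickTargets "bcdefghijklmnopqrstuvwxyz".toList PySem.Set.empty m
            (PySem.Set.ofList word.toList)).contains c = true
      then String.singleton (Char.ofNat (c.toNat - 1)) else String.singleton c)
      = (fun c => [c]) ∘ applyT (pickTargets "bcdefghijklmnopqrstuvwxyz".toList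
          PySem.Set.empty m (PySem.Set.ofList word.toList)) := by
    funext c
    simp only [Function.comp_apply, applyT, PySem.Set.contains_eq_listContains]
    by_cases h : List.contains (pickTargets "bcdefghijklmnopqrstuvwxyz".toList
        PySem.Set.empty m (PySem.Set.ofList word.toList)) c = true
    · rw [if_pos h, if_pos h, String.toList_singleton]
    · rw [if_neg h, if_neg h, String.toList_singleton]
  rw [h1, ← List.map_map]
  have := PySem.Chars.join_nil_singletons (word.toList.map (applyT
      (pickTargets "bcdefghijklmnopqrstuvwxyz".toList PySem.Set.empty m
        (PySem.Set.ofList word.toList))))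
  simpa using this

theorem bs_literal : "bcdefghijklmnopqrstuvwxyz".toList
    = ['b','c','d','e','f','g','h','i','j','k','l','m','n','o','p','q','r','s','t','u','v','w','x','y','z'] := by
  decide

theorem forall_mem_of_all {p : Char → Prop} [DecidablePred p] {l : List Char}
    (h : l.all (fun c => decide (p c)) = true) : ∀ c ∈ l, p c :=
  fun c hc => of_decide_eq_true (List.all_eq_true.mp h c hc)

theorem pick_zero (ch : Char) (rest : List Char) (p : PySem.Set Char) :
    pickTargets (ch :: rest) PySem.Set.empty 0 p = PySem.Set.empty := by
  simp [pickTargets]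

-- ===== VERDICT (by name: the statement is the Claim_ definition above) =====
theorem stored_word_spec : Claim_equal_stored_word := by
  unfold Claim_equal_stored_word
  intro word m _
  unfold Spec_stored_word
  rw [alt_eq_map]
  have hrangebs : ∀ c ∈ "bcdefghijklmnopqrstuvwxyz".toList, 98 ≤ c.toNat ∧ c.toNat ≤ 122 := by
    rw [bs_literal]; exact forall_mem_of_all rfl
  have hpairbs : List.Pairwise (· < ·) "bcdefghijklmnopqrstuvwxyz".toList := by
    rw [bs_literal]; decide
  have hword : String.ofList (word.toList.map (applyT [])) = word := by
    rw [show word.toList.map (applyT []) = word.toList.map id from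
      List.map_congr_left (fun x _ => by simp [applyT])]
    simp
  have hmain := loop_invariant "bcdefghijklmnopqrstuvwxyz".toList word.toList [] m
    hrangebs hpairbs (by simp) (by simp)
  rw [hword] at hmain
  have habc : "abcdefghijklmnopqrstuvwxyz".toList
      = 'a' :: "bcdefghijklmnopqrstuvwxyz".toList := by
    rw [bs_literal]; decide
  unfold stored_word
  rw [habc]
  by_cases hm : m = 0
  · subst hm
    have hpick : pickTargets "bcdefghijklmnopqrstuvwxyz".toList PySem.Set.empty 0
        (PySem.Set.ofList word.toList) = PySem.Set.empty := by
      rw [bs_literal]; exact pick_zero _ _ _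
    rw [hpick]
    simp only [storedWordLoopA]
    rw [if_pos (by simp)]
    have he : (PySem.Set.empty : List Char) = [] := rfl
    rw [he]
    exact hword.symm
  · -- the 'a' iteration never spends an operation: a -> z only makes the word larger
    have hmb : ¬ ((m == 0) = true) := by simp [hm]
    have hA : (storedWordLoopA ('a' :: "bcdefghijklmnopqrstuvwxyz".toList) word m).1
        = (storedWordLoopA "bcdefghijklmnopqrstuvwxyz".toList word m).1 := by
      simp only [storedWordLoopA]
      rw [if_neg hmb]
      by_cases hc : PySem.Str.count word (String.singleton 'a') > 0
      · rw [if_pos hc]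
        have hra : (if ('a' == 'a') = true then 'z' else Char.ofNat ('a'.toNat - 1)) = 'z' := rfl
        rw [hra]
        have hnl : ¬ (PySem.Str.replace word (String.singleton 'a') (String.singleton 'z') < word) := by
          intro h
          rw [String.lt_iff_toList_lt, PySem.Str.toList_replace] at h
          simp only [String.toList_singleton] at h
          rw [replace_singleton] at h
          refine not_lex_map word.toList ?_ ((List.lt_iff_lex_lt _ _).mp h)
          intro x _
          by_cases hx : x = 'a'
          · subst hx
            rw [if_pos (by simp)]
            exact fun hlt => absurd (Char.lt_def.mp hlt) (by decide)
          · rw [if_neg (by simpa using hx)]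
            exact lt_irrefl x
        rw [if_neg hnl]
      · rw [if_neg hc]
    rw [hA]
    exact hmain
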